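-- pv_equiv track=rewrite | github.com/twcook/AMG | serialCP.py | get_runs_from_melody
-- ===== SOURCE A (Python) =====
-- def remove_dupes(seq):
--     seen = set()
--     seen_add = seen.add
--     return [ x for x in seq if x not in seen and not seen_add(x)]
--
-- def get_runs_from_melody(melody):
--     # e.g.
--     # 	input: [0, 2, 4, 2, 0, 7, 5, -3, 2, 0]
--     #	output: [[0, 2, 4], [4, 2, 0], [7, 5, -3]]
--
--     runs = []
--
--     for i in range(len(melody) - 2):
--         for j in range(i + 2, len(melody)):
--             trial_run = melody[i:j+1]
--             directions = [trial_run[i+1] - trial_run[i] for i in range(len(trial_run) - 1)]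
--             all_directions_equal = (directions.count(directions[0]) == len(directions))
--             if all_directions_equal:
--                 runs.append(tuple(trial_run))
--     runs = remove_dupes(runs)
--
--     # remove runs contained in other runs
--
--     contained_runs = []
--     for run1 in runs:
--         for run2 in runs:
--             if run1 != run2 and ''.join(map(str, run2)) in ''.join(map(str, run1)): # run2 contained in run1
--                 if run2 not in contained_runs:
--                     contained_runs.append(run2)
--
--     for run in contained_runs:
--         runs.remove(run)
--
--     return runs
-- ===== SOURCE B (Python) =====
-- def get_runs_from_melody(melody):
--     n = len(melody)
--     # end[i] = last index of the maximal constant-step stretch starting at i (one backward pass)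
--     end = [0] * n
--     for i in range(n - 2, -1, -1):
--         if i + 2 < n and melody[i + 2] - melody[i + 1] == melody[i + 1] - melody[i]:
--             end[i] = end[i + 1]
--         else:
--             end[i] = i + 1
--     runs = [tuple(melody[i:j + 1]) for i in range(n) for j in range(i + 2, end[i] + 1)]
--     runs = list(dict.fromkeys(runs))
--     joined = [(run, ''.join(map(str, run))) for run in runs]
--     return [run for run, s in joined
--             if not any(run2 != run and s in s2 for run2, s2 in joined)]
-- ===== Notes on version B (the rewrite author's own statement) =====
-- stated objective: faster
-- what changed: B replaces A's enumeration of all O(n^2) candidate slices with an O(length) per-slice direction recheck by a single O(n) backward pass computing, for every start index, the end of its maximal constant-step stretch, emits the runs directly from that table, dedups with dict.fromkeys, and precomputes each run's digit-string once for the containment filter.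
import Mathlib
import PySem

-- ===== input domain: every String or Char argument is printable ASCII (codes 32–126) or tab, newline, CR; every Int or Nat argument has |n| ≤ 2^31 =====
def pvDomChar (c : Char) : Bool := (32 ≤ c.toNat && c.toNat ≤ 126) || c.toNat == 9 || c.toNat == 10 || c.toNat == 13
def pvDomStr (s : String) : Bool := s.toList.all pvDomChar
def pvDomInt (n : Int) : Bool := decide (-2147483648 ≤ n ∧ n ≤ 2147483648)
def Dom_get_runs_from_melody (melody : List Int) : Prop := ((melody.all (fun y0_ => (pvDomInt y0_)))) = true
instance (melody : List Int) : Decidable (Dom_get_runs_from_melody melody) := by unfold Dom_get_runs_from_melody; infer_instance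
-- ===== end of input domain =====

-- B replaces A's O(n^3) all-slices generation by an O(n) backward pass computing, for every start
-- index, the end of its maximal constant-step stretch, then emits/dedups/filters the same runs.

-- ===== PORT A =====

-- ''.join(map(str, run)) — the containment key both sources build
def pvJoin (run : List Int) : List Char := PySem.Chars.join [] (run.map PySem.Int.toChars)

def remove_dupes (seq : List (List Int)) : List (List Int) :=
  -- seen = set(); [x for x in seq if x not in seen and not seen_add(x)]
  (seq.foldl
    (fun (st : PySem.Set (List Int) × List (List Int)) x =>
      if x ∈ st.1 then st else (PySem.Set.add st.1 x, st.2 ++ [x]))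
    (PySem.Set.empty, [])).2

def get_runs_from_melody (melody : List Int) : List (List Int) :=
  let n : Int := melody.length
  let runs :=
    (PySem.List.pyRange 0 (n - 2) 1).foldl (fun runs i =>
      (PySem.List.pyRange (i + 2) n 1).foldl (fun runs j =>
        let trial_run := PySem.List.slice melody (some i) (some (j + 1))
        let directions := (PySem.List.pyRange 0 ((trial_run.length : Int) - 1) 1).map
          (fun k => PySem.List.pyGetD trial_run (k + 1) 0 - PySem.List.pyGetD trial_run k 0)
        -- directions[0]: directions is nonempty here (trial_run has ≥ 3 elements), so pyGetD is exact
        let all_directions_equal :=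
          PySem.List.count directions (PySem.List.pyGetD directions 0 0) = directions.length
        if all_directions_equal then runs ++ [trial_run] else runs) runs) []
  let runs := remove_dupes runs
  let contained_runs :=
    runs.foldl (fun contained run1 =>
      runs.foldl (fun contained run2 =>
        if run1 ≠ run2 ∧ PySem.Chars.isIn (pvJoin run2) (pvJoin run1) then
          (if run2 ∈ contained then contained else contained ++ [run2])
        else contained) contained) []
  -- runs.remove(run): every removed run is a member, so the ValueError branch (none) is unreachable
  contained_runs.foldl (fun runs run => (PySem.List.remove? runs run).getD runs) runs

-- ===== PORT B =====

def get_runs_from_melody_alt (melody : List Int) : List (List Int) :=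
  let n : Int := melody.length
  -- end[i] = last index of the maximal constant-step stretch starting at i (one backward pass)
  let endArr : List Int :=
    (PySem.List.pyRange (n - 2) (-1) (-1)).foldl
      (fun endArr i =>
        if i + 2 < n ∧ PySem.List.pyGetD melody (i + 2) 0 - PySem.List.pyGetD melody (i + 1) 0
            = PySem.List.pyGetD melody (i + 1) 0 - PySem.List.pyGetD melody i 0 then
          PySem.List.pySetD endArr i (PySem.List.pyGetD endArr (i + 1) 0)
        else
          PySem.List.pySetD endArr i (i + 1))
      (List.replicate melody.length 0)
  let runs :=
    (PySem.List.pyRange 0 n 1).flatMap (fun i =>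
      (PySem.List.pyRange (i + 2) (PySem.List.pyGetD endArr i 0 + 1) 1).map
        (fun j => PySem.List.slice melody (some i) (some (j + 1))))
  let runs := PySem.List.dedup runs
  let joined := runs.map (fun run => (run, pvJoin run))
  (joined.filter (fun p =>
      ! joined.any (fun q => (q.1 != p.1) && PySem.Chars.isIn p.2 q.2))).map (·.1)

-- ===== PRECONDITION & SPEC =====
def Spec_get_runs_from_melody (melody : List Int) (out : List (List Int)) : Prop := out = get_runs_from_melody_alt melody
instance (melody : List Int) (out : List (List Int)) : Decidable (Spec_get_runs_from_melody melody out) := by unfold Spec_get_runs_from_melody; infer_instance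

-- ===== CLAIM (what is proved, stated in full; the proofs are below) =====
def Claim_equal_get_runs_from_melody : Prop := ∀ (melody : List Int), Dom_get_runs_from_melody melody → Spec_get_runs_from_melody melody (get_runs_from_melody melody)

-- ===== LEMMAS AND PROOFS =====

def pvDiff (m : List Int) (k : Nat) : Int := m.getD (k + 1) 0 - m.getD k 0
def pvEnd (m : List Int) (i : Nat) : Nat :=
  if i + 2 < m.length ∧ pvDiff m (i + 1) = pvDiff m i then pvEnd m (i + 1) else i + 1
termination_by m.length - i
decreasing_by omega

lemma pvEnd_ge (m : List Int) (i : Nat) : i + 1 ≤ pvEnd m i := by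
  fun_induction pvEnd m i with
  | case1 i h ih => omega
  | case2 i h => omega

lemma pvEnd_le (m : List Int) (i : Nat) (h : i + 2 ≤ m.length) : pvEnd m i + 1 ≤ m.length := by
  fun_induction pvEnd m i with
  | case1 i h2 ih => exact ih (by omega)
  | case2 i h2 => omega

lemma pvEnd_iff (m : List Int) (i j : Nat) (hij : i + 1 ≤ j) (hj : j + 1 ≤ m.length) :
    j ≤ pvEnd m i ↔ ∀ k, i ≤ k → k < j → pvDiff m k = pvDiff m i := by
  induction hd : m.length - i using Nat.strong_induction_on generalizing i with
  | _ d IH =>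
  rw [pvEnd]
  by_cases hc : i + 2 < m.length ∧ pvDiff m (i + 1) = pvDiff m i
  · rw [if_pos hc]
    by_cases hji : j = i + 1
    · subst hji
      have := pvEnd_ge m (i + 1)
      constructor
      · intro _ k hk1 hk2
        have hk : k = i := by omega
        subst hk; rfl
      · intro _; omega
    · rw [IH (m.length - (i + 1)) (by omega) (i + 1) (by omega) rfl]
      constructor
      · intro h k hk1 hk2
        rcases Nat.eq_or_lt_of_le hk1 with rfl | hk
        · rfl
        · rw [h k (by omega) hk2]; exact hc.2
      · intro h k hk1 hk2
        rw [h k (by omega) hk2]; exact hc.2.symm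
  · rw [if_neg hc]
    constructor
    · intro h k hk1 hk2
      have hk : k = i := by omega
      subst hk; rfl
    · intro h
      by_contra hlt
      rcases not_and_or.mp hc with h1 | h1
      · omega
      · exact h1 (h (i + 1) (by omega) (by omega))

lemma pvStep_eq (m arr : List Int) (a : Nat)
    (hv : a + 3 ≤ m.length → arr.getD (a + 1) 0 = (pvEnd m (a + 1) : Int)) :
    (if (a : Int) + 2 < (m.length : Int) ∧
          PySem.List.pyGetD m ((a : Int) + 2) 0 - PySem.List.pyGetD m ((a : Int) + 1) 0
            = PySem.List.pyGetD m ((a : Int) + 1) 0 - PySem.List.pyGetD m (a : Int) 0 then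
        PySem.List.pySetD arr (a : Int) (PySem.List.pyGetD arr ((a : Int) + 1) 0)
      else PySem.List.pySetD arr (a : Int) ((a : Int) + 1))
      = arr.set a ((pvEnd m a : Nat) : Int) := by
  have e2 : (a : Int) + 2 = ((a + 2 : Nat) : Int) := by push_cast; ring
  have e1 : (a : Int) + 1 = ((a + 1 : Nat) : Int) := by push_cast; ring
  rw [e2, e1]
  simp only [PySem.List.pyGetD_natCast, PySem.List.pySetD_natCast]
  have hcond : (((a + 2 : Nat) : Int) < (m.length : Int) ∧
      m.getD (a + 2) 0 - m.getD (a + 1) 0 = m.getD (a + 1) 0 - m.getD a 0)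
      ↔ (a + 2 < m.length ∧ pvDiff m (a + 1) = pvDiff m a) := by
    have h12 : a + 1 + 1 = a + 2 := by omega
    unfold pvDiff
    rw [h12]
    constructor
    · rintro ⟨h1, h2⟩; exact ⟨by exact_mod_cast h1, h2⟩
    · rintro ⟨h1, h2⟩; exact ⟨by exact_mod_cast h1, h2⟩
  rw [if_congr hcond rfl rfl, pvEnd]
  split_ifs with h
  · rw [hv (by omega)]
  · rfl

lemma pvFold_end (m : List Int) (a : Nat) (arr : List Int)
    (hlen : arr.length = m.length) (ha : a + 2 ≤ m.length)
    (hhi : ∀ k : Nat, a < k → k + 2 ≤ m.length → arr.getD k 0 = (pvEnd m k : Int))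
    (hz : ∀ k : Nat, m.length < k + 2 → arr.getD k 0 = 0) :
    (((PySem.List.pyRange (a : Int) (-1) (-1)).foldl
      (fun endArr i =>
        if i + 2 < (m.length : Int) ∧
            PySem.List.pyGetD m (i + 2) 0 - PySem.List.pyGetD m (i + 1) 0
              = PySem.List.pyGetD m (i + 1) 0 - PySem.List.pyGetD m i 0 then
          PySem.List.pySetD endArr i (PySem.List.pyGetD endArr (i + 1) 0)
        else PySem.List.pySetD endArr i (i + 1)) arr).length = m.length) ∧
      (∀ k : Nat, k + 2 ≤ m.length → ((PySem.List.pyRange (a : Int) (-1) (-1)).foldl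
      (fun endArr i =>
        if i + 2 < (m.length : Int) ∧
            PySem.List.pyGetD m (i + 2) 0 - PySem.List.pyGetD m (i + 1) 0
              = PySem.List.pyGetD m (i + 1) 0 - PySem.List.pyGetD m i 0 then
          PySem.List.pySetD endArr i (PySem.List.pyGetD endArr (i + 1) 0)
        else PySem.List.pySetD endArr i (i + 1)) arr).getD k 0 = (pvEnd m k : Int)) ∧
      (∀ k : Nat, m.length < k + 2 → ((PySem.List.pyRange (a : Int) (-1) (-1)).foldl
      (fun endArr i =>
        if i + 2 < (m.length : Int) ∧
            PySem.List.pyGetD m (i + 2) 0 - PySem.List.pyGetD m (i + 1) 0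
              = PySem.List.pyGetD m (i + 1) 0 - PySem.List.pyGetD m i 0 then
          PySem.List.pySetD endArr i (PySem.List.pyGetD endArr (i + 1) 0)
        else PySem.List.pySetD endArr i (i + 1)) arr).getD k 0 = 0) := by
  induction a generalizing arr with
  | zero =>
    rw [PySem.List.pyRange_neg_one_cons (by norm_num : (-1:Int) < ((0:Nat):Int))]
    have hnil : PySem.List.pyRange (((0:Nat):Int) - 1) (-1) (-1) = [] :=
      PySem.List.pyRange_neg_one_eq_nil (by norm_num)
    rw [hnil, List.foldl_cons, List.foldl_nil,
        pvStep_eq m arr 0 (fun h3 => hhi 1 (by omega) (by omega))]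
    refine ⟨by simp [hlen], ?_, ?_⟩
    · intro k hk
      rcases Nat.eq_zero_or_pos k with rfl | hkpos
      · rw [List.getD_eq_getElem?_getD, List.getElem?_set, if_pos rfl, if_pos (by omega)]
        rfl
      · rw [List.getD_eq_getElem?_getD, List.getElem?_set, if_neg (by omega),
            ← List.getD_eq_getElem?_getD]
        exact hhi k (by omega) hk
    · intro k hk
      rw [List.getD_eq_getElem?_getD, List.getElem?_set, if_neg (by omega),
          ← List.getD_eq_getElem?_getD]
      exact hz k hk
  | succ a ih =>
    rw [PySem.List.pyRange_neg_one_cons (by have : (0:Int) ≤ ((a+1:Nat):Int) := Int.natCast_nonneg _; omega : (-1:Int) < ((a+1:Nat):Int))]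
    have hstep : (((a+1:Nat):Int) - 1) = ((a:Nat):Int) := by push_cast; ring
    rw [hstep, List.foldl_cons,
        pvStep_eq m arr (a+1) (fun h3 => hhi (a+2) (by omega) (by omega))]
    exact ih (arr.set (a+1) ((pvEnd m (a+1) : Nat):Int))
      (by simp [hlen]) (by omega)
      (by
        intro k hk1 hk2
        rcases Nat.eq_or_lt_of_le hk1 with heq | hlt
        · rw [← heq, List.getD_eq_getElem?_getD, List.getElem?_set, if_pos rfl,
              if_pos (by omega)]
          rfl
        · rw [List.getD_eq_getElem?_getD, List.getElem?_set, if_neg (by omega),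
              ← List.getD_eq_getElem?_getD]
          exact hhi k (by omega) hk2)
      (by
        intro k hk
        rw [List.getD_eq_getElem?_getD, List.getElem?_set, if_neg (by omega),
            ← List.getD_eq_getElem?_getD]
        exact hz k hk)

lemma pvTestA (m : List Int) (i j : Int) (hi : 0 ≤ i) (hij : i + 2 ≤ j) (hj : j < (m.length : Int)) :
    (PySem.List.count
        ((PySem.List.pyRange 0 (((PySem.List.slice m (some i) (some (j + 1))).length : Int) - 1) 1).map
          (fun k => PySem.List.pyGetD (PySem.List.slice m (some i) (some (j + 1))) (k + 1) 0
                  - PySem.List.pyGetD (PySem.List.slice m (some i) (some (j + 1))) k 0))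
        (PySem.List.pyGetD
          ((PySem.List.pyRange 0 (((PySem.List.slice m (some i) (some (j + 1))).length : Int) - 1) 1).map
            (fun k => PySem.List.pyGetD (PySem.List.slice m (some i) (some (j + 1))) (k + 1) 0
                    - PySem.List.pyGetD (PySem.List.slice m (some i) (some (j + 1))) k 0)) 0 0)
      = ((PySem.List.pyRange 0 (((PySem.List.slice m (some i) (some (j + 1))).length : Int) - 1) 1).map
          (fun k => PySem.List.pyGetD (PySem.List.slice m (some i) (some (j + 1))) (k + 1) 0
                  - PySem.List.pyGetD (PySem.List.slice m (some i) (some (j + 1))) k 0)).length)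
    ↔ ∀ k : Nat, i.toNat ≤ k → k < j.toNat → pvDiff m k = pvDiff m i.toNat := by
  obtain ⟨i', rfl⟩ : ∃ i' : Nat, i = (i' : Int) := ⟨i.toNat, (Int.toNat_of_nonneg hi).symm⟩
  obtain ⟨j', rfl⟩ : ∃ j' : Nat, j = (j' : Int) := ⟨j.toNat, (Int.toNat_of_nonneg (by omega)).symm⟩
  have hij' : i' + 2 ≤ j' := by exact_mod_cast hij
  have hj' : j' < m.length := by exact_mod_cast hj
  have ej : ((j' : Int) + 1) = ((j' + 1 : Nat) : Int) := by push_cast; ring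
  rw [ej, PySem.List.slice_natCast]
  have hlen : ((m.drop i').take (j' + 1 - i')).length = j' + 1 - i' := by
    simp [List.length_take, List.length_drop]; omega
  have hT : ∀ t : Nat, t < j' + 1 - i' →
      ((m.drop i').take (j' + 1 - i')).getD t 0 = m.getD (i' + t) 0 := by
    intro t ht
    rw [List.getD_eq_getElem?_getD, List.getElem?_take_of_lt ht, List.getElem?_drop,
        ← List.getD_eq_getElem?_getD]
  rw [hlen]
  have elen : ((j' + 1 - i' : Nat) : Int) - 1 = ((j' - i' : Nat) : Int) := by omega
  rw [elen]
  -- value of the k-th direction, for Nat k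
  have hF : ∀ t : Nat, t < j' - i' →
      PySem.List.pyGetD ((m.drop i').take (j' + 1 - i')) ((t : Int) + 1) 0
        - PySem.List.pyGetD ((m.drop i').take (j' + 1 - i')) (t : Int) 0
      = pvDiff m (i' + t) := by
    intro t ht
    have e1 : ((t : Int) + 1) = ((t + 1 : Nat) : Int) := by push_cast; ring
    rw [e1, PySem.List.pyGetD_natCast, PySem.List.pyGetD_natCast,
        hT (t + 1) (by omega), hT t (by omega)]
    unfold pvDiff
    have : i' + (t + 1) = i' + t + 1 := by omega
    rw [this]
  -- directions[0]
  have e0 : (0 : Int) = ((0 : Nat) : Int) := by norm_num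
  have hd0 : PySem.List.pyGetD
      ((PySem.List.pyRange 0 ((j' - i' : Nat) : Int) 1).map
        (fun k => PySem.List.pyGetD ((m.drop i').take (j' + 1 - i')) (k + 1) 0
                - PySem.List.pyGetD ((m.drop i').take (j' + 1 - i')) k 0)) 0 0
      = pvDiff m i' := by
    rw [PySem.List.pyGetD_map_pyRange_of_nonneg _ _ 0 _ le_rfl (by exact_mod_cast (by omega : 0 < j' - i'))]
    have := hF 0 (by omega)
    simpa using this
  rw [hd0, PySem.List.count_eq, List.count_eq_length]
  constructor
  · intro h k hk1 hk2
    simp only [Int.toNat_natCast] at hk1 hk2 ⊢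
    have hmem : ((k - i' : Nat) : Int) ∈ PySem.List.pyRange 0 ((j' - i' : Nat) : Int) 1 :=
      (PySem.List.mem_pyRange_one).mpr ⟨by omega, by omega⟩
    have h1 := h _ (List.mem_map_of_mem hmem)
    rw [hF (k - i') (by omega)] at h1
    have hik : i' + (k - i') = k := by omega
    rw [hik] at h1
    exact h1.symm
  · intro h b hb
    simp only [List.mem_map] at hb
    obtain ⟨k, hk, rfl⟩ := hb
    rw [PySem.List.mem_pyRange_one] at hk
    obtain ⟨k', rfl⟩ : ∃ k' : Nat, k = (k' : Int) := ⟨k.toNat, (Int.toNat_of_nonneg hk.1).symm⟩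
    have hk' : k' < j' - i' := by exact_mod_cast hk.2
    rw [hF k' hk']
    simp only [Int.toNat_natCast] at h
    exact (h (i' + k') (by omega) (by omega)).symm

def pvEndArr (m : List Int) : List Int :=
  (PySem.List.pyRange ((m.length : Int) - 2) (-1) (-1)).foldl
    (fun endArr i =>
      if i + 2 < (m.length : Int) ∧
          PySem.List.pyGetD m (i + 2) 0 - PySem.List.pyGetD m (i + 1) 0
            = PySem.List.pyGetD m (i + 1) 0 - PySem.List.pyGetD m i 0 then
        PySem.List.pySetD endArr i (PySem.List.pyGetD endArr (i + 1) 0)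
      else PySem.List.pySetD endArr i (i + 1))
    (List.replicate m.length 0)

lemma pvEndArr_spec (m : List Int) :
    (∀ k : Nat, k + 2 ≤ m.length → (pvEndArr m).getD k 0 = (pvEnd m k : Int)) ∧
    (∀ k : Nat, m.length < k + 2 → (pvEndArr m).getD k 0 = 0) := by
  have hrep : ∀ k : Nat, (List.replicate m.length (0 : Int)).getD k 0 = 0 := by
    intro k; rw [List.getD_eq_getElem?_getD, List.getElem?_replicate]; split <;> rfl
  unfold pvEndArr
  by_cases h2 : 2 ≤ m.length
  · have ec : ((m.length : Int) - 2) = ((m.length - 2 : Nat) : Int) := by omega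
    rw [ec]
    have h := pvFold_end m (m.length - 2) (List.replicate m.length 0)
      (by simp) (by omega)
      (by intro k hk1 hk2; exact absurd hk2 (by omega))
      (by intro k _; exact hrep k)
    exact ⟨h.2.1, h.2.2⟩
  · rw [PySem.List.pyRange_neg_one_eq_nil (by omega : ((m.length : Int) - 2) ≤ -1), List.foldl_nil]
    exact ⟨fun k hk => absurd hk (by omega), fun k _ => hrep k⟩

lemma pvFilterRange (p : Int → Bool) (a e b : Int) (h1 : a ≤ e + 1) (h2 : e + 1 ≤ b)
    (hp : ∀ j, a ≤ j → j < b → (p j = true ↔ j ≤ e)) :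
    List.filter p (PySem.List.pyRange a b 1) = PySem.List.pyRange a (e + 1) 1 := by
  rw [PySem.List.pyRange_one_append a (e + 1) b h1 h2, List.filter_append]
  have hA : List.filter p (PySem.List.pyRange a (e + 1) 1) = PySem.List.pyRange a (e + 1) 1 :=
    List.filter_eq_self.mpr (by
      intro j hj; rw [PySem.List.mem_pyRange_one] at hj
      exact (hp j hj.1 (by omega)).mpr (by omega))
  have hB : List.filter p (PySem.List.pyRange (e + 1) b 1) = [] :=
    List.filter_eq_nil_iff.mpr (by
      intro j hj; rw [PySem.List.mem_pyRange_one] at hj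
      intro hpj; have := (hp j (by omega) hj.2).mp hpj; omega)
  rw [hA, hB, List.append_nil]

lemma pvGen (m : List Int) :
    (PySem.List.pyRange 0 ((m.length : Int) - 2) 1).foldl (fun runs i =>
      (PySem.List.pyRange (i + 2) (m.length : Int) 1).foldl (fun runs j =>
        if PySem.List.count
            ((PySem.List.pyRange 0 (((PySem.List.slice m (some i) (some (j + 1))).length : Int) - 1) 1).map
              (fun k => PySem.List.pyGetD (PySem.List.slice m (some i) (some (j + 1))) (k + 1) 0
                      - PySem.List.pyGetD (PySem.List.slice m (some i) (some (j + 1))) k 0))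
            (PySem.List.pyGetD
              ((PySem.List.pyRange 0 (((PySem.List.slice m (some i) (some (j + 1))).length : Int) - 1) 1).map
                (fun k => PySem.List.pyGetD (PySem.List.slice m (some i) (some (j + 1))) (k + 1) 0
                        - PySem.List.pyGetD (PySem.List.slice m (some i) (some (j + 1))) k 0)) 0 0)
          = ((PySem.List.pyRange 0 (((PySem.List.slice m (some i) (some (j + 1))).length : Int) - 1) 1).map
              (fun k => PySem.List.pyGetD (PySem.List.slice m (some i) (some (j + 1))) (k + 1) 0
                      - PySem.List.pyGetD (PySem.List.slice m (some i) (some (j + 1))) k 0)).length then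
          runs ++ [PySem.List.slice m (some i) (some (j + 1))]
        else runs) runs) []
    = (PySem.List.pyRange 0 (m.length : Int) 1).flatMap (fun i =>
        (PySem.List.pyRange (i + 2) (PySem.List.pyGetD (pvEndArr m) i 0 + 1) 1).map
          (fun j => PySem.List.slice m (some i) (some (j + 1)))) := by
  obtain ⟨hE, hZ⟩ := pvEndArr_spec m
  simp only [PySem.List.foldl_append_ite, PySem.List.foldl_append_eq_flatMap, List.nil_append]
  have hEi : ∀ i : Int, 0 ≤ i → i + 2 ≤ (m.length : Int) →
      PySem.List.pyGetD (pvEndArr m) i 0 = ((pvEnd m i.toNat : Nat) : Int) := by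
    intro i h0 hi2
    obtain ⟨i', rfl⟩ : ∃ i' : Nat, i = (i' : Int) := ⟨i.toNat, (Int.toNat_of_nonneg h0).symm⟩
    rw [PySem.List.pyGetD_natCast, Int.toNat_natCast]
    exact hE i' (by omega)
  have hZi : ∀ i : Int, 0 ≤ i → (m.length : Int) < i + 2 →
      PySem.List.pyGetD (pvEndArr m) i 0 = 0 := by
    intro i h0 hi2
    obtain ⟨i', rfl⟩ : ∃ i' : Nat, i = (i' : Int) := ⟨i.toNat, (Int.toNat_of_nonneg h0).symm⟩
    rw [PySem.List.pyGetD_natCast]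
    exact hZ i' (by omega)
  by_cases h2 : 2 ≤ m.length
  · rw [PySem.List.pyRange_one_append 0 ((m.length : Int) - 2) (m.length : Int) (by omega) (by omega),
        List.flatMap_append]
    have htail : List.flatMap (fun i =>
        (PySem.List.pyRange (i + 2) (PySem.List.pyGetD (pvEndArr m) i 0 + 1) 1).map
          (fun j => PySem.List.slice m (some i) (some (j + 1))))
        (PySem.List.pyRange ((m.length : Int) - 2) (m.length : Int) 1) = [] := by
      rw [List.flatMap_eq_nil_iff]
      intro i hi
      rw [PySem.List.mem_pyRange_one] at hi
      by_cases hc : i + 2 ≤ (m.length : Int)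
      · rw [hEi i (by omega) hc]
        have hle := pvEnd_le m i.toNat (by omega)
        rw [PySem.List.pyRange_one_eq_nil (by omega), List.map_nil]
      · rw [hZi i (by omega) (by omega)]
        rw [PySem.List.pyRange_one_eq_nil (by omega), List.map_nil]
    rw [htail, List.append_nil]
    apply List.flatMap_congr
    intro i hi
    rw [PySem.List.mem_pyRange_one] at hi
    have h0 : 0 ≤ i := hi.1
    have hi2 : i + 2 ≤ (m.length : Int) := by omega
    rw [hEi i h0 hi2]
    have hge := pvEnd_ge m i.toNat
    have hle := pvEnd_le m i.toNat (by omega)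
    have e1 : i + 2 ≤ ((pvEnd m i.toNat : Nat) : Int) + 1 := by omega
    have e2 : ((pvEnd m i.toNat : Nat) : Int) + 1 ≤ (m.length : Int) := by omega
    refine congrArg (List.map _) ?_
    refine pvFilterRange _ (i + 2) ((pvEnd m i.toNat : Nat) : Int) (m.length : Int) e1 e2 ?_
    intro j hj1 hj2
    rw [decide_eq_true_eq, pvTestA m i j h0 hj1 hj2]
    constructor
    · intro hforall
      have := (pvEnd_iff m i.toNat j.toNat (by omega) (by omega)).mpr hforall
      omega
    · intro hje
      exact (pvEnd_iff m i.toNat j.toNat (by omega) (by omega)).mp (by omega)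
  · rw [PySem.List.pyRange_one_eq_nil (by omega : (m.length : Int) - 2 ≤ 0), List.flatMap_nil]
    symm
    rw [List.flatMap_eq_nil_iff]
    intro i hi
    rw [PySem.List.mem_pyRange_one] at hi
    rw [hZi i hi.1 (by omega)]
    rw [PySem.List.pyRange_one_eq_nil (by omega), List.map_nil]

lemma pvDedup (seq : List (List Int)) : remove_dupes seq = PySem.List.dedup seq := by
  have H : ∀ (xs s : List (List Int)),
      (xs.foldl (fun (st : PySem.Set (List Int) × List (List Int)) x =>
        if x ∈ st.1 then st else (PySem.Set.add st.1 x, st.2 ++ [x])) (s, s)).2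
      = xs.foldl PySem.Set.add s := by
    intro xs
    induction xs with
    | nil => intro s; rfl
    | cons x xs ih =>
      intro s
      simp only [List.foldl_cons]
      by_cases hx : x ∈ s
      · rw [if_pos hx, PySem.Set.add_of_mem hx, ih]
      · rw [if_neg hx, PySem.Set.add_of_not_mem hx, ← ih (s ++ [x])]
  rw [remove_dupes, PySem.List.dedup_eq_ofList, PySem.Set.ofList_eq_foldl]
  exact H seq []

lemma pvInner (R c0 : List (List Int)) (r1 x : List Int) :
    x ∈ R.foldl (fun contained run2 =>
        if r1 ≠ run2 ∧ PySem.Chars.isIn (pvJoin run2) (pvJoin r1) then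
          (if run2 ∈ contained then contained else contained ++ [run2])
        else contained) c0
    ↔ x ∈ c0 ∨ (x ∈ R ∧ r1 ≠ x ∧ PySem.Chars.isIn (pvJoin x) (pvJoin r1)) := by
  induction R generalizing c0 with
  | nil => simp
  | cons r R ih =>
    simp only [List.foldl_cons, ih]
    by_cases h : r1 ≠ r ∧ PySem.Chars.isIn (pvJoin r) (pvJoin r1)
    · rw [if_pos h]
      by_cases hm : r ∈ c0
      · rw [if_pos hm]
        constructor
        · rintro (h1 | h1)
          · exact Or.inl h1
          · exact Or.inr ⟨List.mem_cons_of_mem _ h1.1, h1.2⟩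
        · rintro (h1 | ⟨h1, h2⟩)
          · exact Or.inl h1
          · rcases List.mem_cons.mp h1 with rfl | h1
            · exact Or.inl hm
            · exact Or.inr ⟨h1, h2⟩
      · rw [if_neg hm]
        simp only [List.mem_append, List.mem_cons, List.not_mem_nil, or_false]
        constructor
        · rintro ((h1 | rfl) | h1)
          · exact Or.inl h1
          · exact Or.inr ⟨Or.inl rfl, h⟩
          · exact Or.inr ⟨Or.inr h1.1, h1.2⟩
        · rintro (h1 | ⟨(rfl | h1), h2⟩)
          · exact Or.inl (Or.inl h1)
          · exact Or.inl (Or.inr rfl)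
          · exact Or.inr ⟨h1, h2⟩
    · rw [if_neg h]
      constructor
      · rintro (h1 | h1)
        · exact Or.inl h1
        · exact Or.inr ⟨List.mem_cons_of_mem _ h1.1, h1.2⟩
      · rintro (h1 | ⟨h1, h2⟩)
        · exact Or.inl h1
        · rcases List.mem_cons.mp h1 with rfl | h1
          · exact absurd h2 h
          · exact Or.inr ⟨h1, h2⟩

lemma pvContained (R L c0 : List (List Int)) (x : List Int) :
    x ∈ L.foldl (fun contained run1 =>
        R.foldl (fun contained run2 =>
          if run1 ≠ run2 ∧ PySem.Chars.isIn (pvJoin run2) (pvJoin run1) then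
            (if run2 ∈ contained then contained else contained ++ [run2])
          else contained) contained) c0
    ↔ x ∈ c0 ∨ ∃ run1 ∈ L, x ∈ R ∧ run1 ≠ x ∧ PySem.Chars.isIn (pvJoin x) (pvJoin run1) := by
  induction L generalizing c0 with
  | nil => simp
  | cons r1 L ih =>
    simp only [List.foldl_cons, ih, pvInner, List.mem_cons]
    constructor
    · rintro ((h1 | h1) | ⟨a, ha, h2⟩)
      · exact Or.inl h1
      · exact Or.inr ⟨r1, Or.inl rfl, h1⟩
      · exact Or.inr ⟨a, Or.inr ha, h2⟩
    · rintro (h1 | ⟨a, (rfl | ha), h2⟩)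
      · exact Or.inl (Or.inl h1)
      · exact Or.inl (Or.inr h2)
      · exact Or.inr ⟨a, ha, h2⟩

lemma pvRemoveFold (cs : List (List Int)) (l : List (List Int)) (hl : l.Nodup) :
    cs.foldl (fun runs run => (PySem.List.remove? runs run).getD runs) l
      = l.filter (fun r => decide (r ∉ cs)) := by
  induction cs generalizing l with
  | nil => simp
  | cons c cs ih =>
    simp only [List.foldl_cons]
    have h1 : (PySem.List.remove? l c).getD l = l.filter (fun r => decide (r ≠ c)) := by
      by_cases hc : c ∈ l
      · rw [PySem.List.remove?_eq_some_erase l c hc, Option.getD_some, List.Nodup.erase_eq_filter hl]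
        apply List.filter_congr; intro a _; rw [Bool.eq_iff_iff]; simp
      · rw [(PySem.List.remove?_eq_none_iff l c).mpr hc, Option.getD_none]
        rw [List.filter_eq_self.mpr]
        intro a ha
        simp only [decide_eq_true_eq]
        rintro rfl; exact hc ha
    rw [h1, ih _ (hl.filter _), List.filter_filter]
    apply List.filter_congr
    intro a _
    rw [Bool.eq_iff_iff]
    simp only [List.mem_cons, not_or, Bool.and_eq_true, decide_eq_true_eq]
    tauto

lemma pvFinal (R : List (List Int)) (hR : R.Nodup) :
    ((R.foldl (fun contained run1 =>
        R.foldl (fun contained run2 =>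
          if run1 ≠ run2 ∧ PySem.Chars.isIn (pvJoin run2) (pvJoin run1) then
            (if run2 ∈ contained then contained else contained ++ [run2])
          else contained) contained) []).foldl
      (fun runs run => (PySem.List.remove? runs run).getD runs) R)
    = ((R.map (fun run => (run, pvJoin run))).filter (fun p =>
        ! (R.map (fun run => (run, pvJoin run))).any
            (fun q => (q.1 != p.1) && PySem.Chars.isIn p.2 q.2))).map (·.1) := by
  rw [pvRemoveFold _ R hR, List.filter_map, List.map_map]
  have hid : ((·.1) ∘ (fun run : List Int => (run, pvJoin run))) = (id : List Int → List Int) := rfl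
  rw [hid, List.map_id]
  apply List.filter_congr
  intro r hr
  rw [Bool.eq_iff_iff, decide_eq_true_eq, Function.comp_apply, Bool.not_eq_true',
      List.any_map, List.any_eq_false]
  have hc := pvContained R R [] r
  constructor
  · intro hnotin x hx
    simp only [Function.comp_apply, Bool.and_eq_true, bne_iff_ne, ne_eq, not_and]
    intro hxr hin
    exact hnotin (hc.mpr (Or.inr ⟨x, hx, hr, hxr, hin⟩))
  · intro h hin
    rcases hc.mp hin with h1 | ⟨x, hx, -, hne, hisin⟩
    · cases h1
    · have h2 := h x hx
      simp only [Function.comp_apply, Bool.and_eq_true, bne_iff_ne, ne_eq, not_and] at h2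
      exact absurd hisin (h2 hne)

-- ===== VERDICT (by name: the statement is the Claim_ definition above) =====
theorem get_runs_from_melody_spec : Claim_equal_get_runs_from_melody := by
  intro melody _
  show Spec_get_runs_from_melody melody (get_runs_from_melody melody)
  unfold Spec_get_runs_from_melody
  have halt : get_runs_from_melody_alt melody =
      (let runs := PySem.List.dedup ((PySem.List.pyRange 0 ((melody.length : Int)) 1).flatMap (fun i =>
          (PySem.List.pyRange (i + 2) (PySem.List.pyGetD (pvEndArr melody) i 0 + 1) 1).map
            (fun j => PySem.List.slice melody (some i) (some (j + 1)))));
       let joined := runs.map (fun run => (run, pvJoin run));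
       (joined.filter (fun p =>
          ! joined.any (fun q => (q.1 != p.1) && PySem.Chars.isIn p.2 q.2))).map (·.1)) := rfl
  rw [halt]
  simp only [get_runs_from_melody]
  rw [pvGen, pvDedup]
  exact pvFinal _ (PySem.List.nodup_dedup _)
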